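-- pv_equiv track=rewrite | github.com/suhjaesuk/codingtest.py | inflearn/section5/P_교육과정설계.py | solution
-- ===== SOURCE A (Python) =====
-- from collections import deque
--
-- def solution(n,m,edu):
--     n = list(n)
--     dq = deque(n)
--     edu= deque(edu)
--
--     while edu:
--         if edu[0] not in dq:
--             edu.popleft()
--         else:
--             cur = dq.popleft()
--             if cur != edu[0]:
--                 return "NO"
--
--     if len(dq)!=0:
--         return "NO"
--
--     return "YES"
-- ===== SOURCE B (Python) =====
-- def solution(n, m, edu):
--     # collapse adjacent duplicate runs of n (A satisfies a whole run with one course)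
--     r = []
--     prev = None
--     for c in n:
--         if (prev is None) or c != prev:
--             r.append(c)
--             prev = c
--     # first-occurrence index of every course in edu
--     first_pos = {}
--     i = 0
--     for c in edu:
--         if c not in first_pos:
--             first_pos[c] = i
--         i += 1
--     # the collapsed required courses must appear with strictly increasing first occurrences
--     p = -1
--     for c in r:
--         if c not in first_pos or first_pos[c] <= p:
--             return "NO"
--         p = first_pos[c]
--     return "YES"
-- ===== Notes on version B (the rewrite author's own statement) =====
-- stated objective: faster
-- what changed: A simulates two deques, rescanning the remaining required-course queue with 'edu[0] not in dq' on every iteration; B instead collapses adjacent duplicate runs of n in one pass, builds a first-occurrence index table of edu in one pass, and checks with a single monotone scan that the collapsed courses have strictly increasing first occurrences.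
import Mathlib
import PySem

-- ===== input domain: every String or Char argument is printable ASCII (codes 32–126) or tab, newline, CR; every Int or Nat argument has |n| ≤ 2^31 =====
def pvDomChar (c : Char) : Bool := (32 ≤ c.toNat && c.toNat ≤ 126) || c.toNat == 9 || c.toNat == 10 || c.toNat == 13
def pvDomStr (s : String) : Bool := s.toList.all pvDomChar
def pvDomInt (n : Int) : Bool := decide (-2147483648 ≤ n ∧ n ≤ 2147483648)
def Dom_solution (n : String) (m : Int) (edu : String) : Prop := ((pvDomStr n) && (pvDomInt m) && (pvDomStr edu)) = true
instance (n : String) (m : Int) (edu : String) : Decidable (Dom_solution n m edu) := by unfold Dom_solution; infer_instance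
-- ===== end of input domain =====

-- B replaces A's queue simulation (whose 'edu[0] not in dq' rescans the remaining
-- courses on every iteration) with: collapse adjacent duplicate runs of n, build a
-- first-occurrence index table of edu in one pass, then one monotone scan.

-- ===== PORT A =====
-- the while loop: dq and edu are the two deques; each step pops from edu or from dq
def solLoopA : List Char → List Char → String
  | dq, [] => if dq.length ≠ 0 then "NO" else "YES"
  | dq, e :: es =>
    if h : e ∈ dq then
      match dq, h with
      | c :: cs, _ => if c ≠ e then "NO" else solLoopA cs (e :: es)
    else solLoopA dq es
termination_by dq edu => dq.length + edu.length

def solution (n : String) (m : Int) (edu : String) : String :=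
  solLoopA n.toList edu.toList

-- ===== PORT B =====
-- for c in n: if prev is None or c != prev: r.append(c); prev = c
def buildR (r : List Char) (prev : Option Char) : List Char → List Char
  | [] => r
  | c :: cs => if prev = none ∨ some c ≠ prev then buildR (r ++ [c]) (some c) cs
               else buildR r prev cs

-- for c in edu: if c not in first_pos: first_pos[c] = i; i += 1
def buildFirst (fp : PySem.Dict Char Int) (i : Int) : List Char → PySem.Dict Char Int
  | [] => fp
  | c :: cs => buildFirst (if fp.contains c then fp else fp.insert c i) (i + 1) cs

-- for c in r: return "NO" if missing or not strictly after p
def solLoopB (fp : PySem.Dict Char Int) : Int → List Char → String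
  | _, [] => "YES"
  | p, c :: cs =>
    match fp.get? c with
    | none => "NO"
    | some q => if q ≤ p then "NO" else solLoopB fp q cs

def solution_alt (n : String) (m : Int) (edu : String) : String :=
  solLoopB (buildFirst PySem.Dict.empty 0 edu.toList) (-1) (buildR [] none n.toList)

-- ===== PRECONDITION & SPEC =====
-- A is total: no Pre_.
def Spec_solution (n : String) (m : Int) (edu : String) (out : String) : Prop := out = solution_alt n m edu
instance (n : String) (m : Int) (edu : String) (out : String) : Decidable (Spec_solution n m edu out) := by unfold Spec_solution; infer_instance

-- ===== CLAIM (what is proved, stated in full; the proofs are below) =====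
def Claim_equal_solution : Prop := ∀ (n : String) (m : Int) (edu : String), Dom_solution n m edu → Spec_solution n m edu (solution n m edu)

-- ===== LEMMAS AND PROOFS =====

-- spec-level adjacent dedup: dedAux p l keeps the elements of l, dropping each one
-- equal to the previously kept element (p = previously kept)
def dedAux : Char → List Char → List Char
  | _, [] => []
  | p, c :: cs => if c = p then dedAux p cs else c :: dedAux c cs

def ded : List Char → List Char
  | [] => []
  | c :: cs => c :: dedAux c cs

theorem buildR_aux (l : List Char) (r : List Char) (p : Char) :
    buildR r (some p) l = r ++ dedAux p l := by
  induction l generalizing r p with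
  | nil => simp [buildR, dedAux]
  | cons c cs ih =>
    by_cases h : c = p
    · subst h
      simp [buildR, dedAux, ih]
    · simp [buildR, dedAux, h, ih]

theorem buildR_eq_ded (l : List Char) : buildR [] none l = ded l := by
  cases l with
  | nil => rfl
  | cons c cs =>
    simp [buildR, ded, buildR_aux]

theorem mem_dedAux (l : List Char) (p x : Char) :
    x ∈ p :: dedAux p l ↔ x ∈ p :: l := by
  induction l generalizing p with
  | nil => simp [dedAux]
  | cons c cs ih =>
    by_cases h : c = p
    · subst h
      have hd : dedAux c (c :: cs) = dedAux c cs := by simp [dedAux]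
      rw [hd, ih]
      simp
    · have hd : dedAux p (c :: cs) = c :: dedAux c cs := by simp [dedAux, h]
      rw [hd]
      constructor
      · intro hx
        rcases List.mem_cons.mp hx with rfl | hx
        · simp
        · have := (ih c).mp hx
          simp only [List.mem_cons] at this ⊢
          tauto
      · intro hx
        simp only [List.mem_cons] at hx
        rcases hx with rfl | rfl | hx
        · simp
        · simp
        · have := (ih c).mpr (List.mem_cons_of_mem _ hx)
          simp only [List.mem_cons] at this ⊢
          tauto

theorem mem_ded (l : List Char) (x : Char) : x ∈ ded l ↔ x ∈ l := by
  cases l with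
  | nil => simp [ded]
  | cons c cs => exact mem_dedAux cs c x

theorem chain'_dedAux (l : List Char) (p : Char) :
    List.IsChain (· ≠ ·) (p :: dedAux p l) := by
  induction l generalizing p with
  | nil => simp [dedAux]
  | cons c cs ih =>
    by_cases h : c = p
    · subst h
      have hd : dedAux c (c :: cs) = dedAux c cs := by simp [dedAux]
      rw [hd]; exact ih c
    · have hd : dedAux p (c :: cs) = c :: dedAux c cs := by simp [dedAux, h]
      rw [hd]
      exact List.isChain_cons_cons.mpr ⟨fun hpc => h hpc.symm, ih c⟩

theorem chain'_ded (l : List Char) : List.IsChain (· ≠ ·) (ded l) := by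
  cases l with
  | nil => exact List.isChain_nil
  | cons c cs => exact chain'_dedAux cs c

-- one edu element satisfies a whole leading run: a duplicated front of dq collapses
theorem pop_dup (e : Char) (cs : List Char) (edu : List Char) :
    solLoopA (e :: e :: cs) edu = solLoopA (e :: cs) edu := by
  induction edu with
  | nil => simp [solLoopA]
  | cons f fs ih =>
    by_cases hf : f = e
    · subst hf
      rw [solLoopA, dif_pos (by simp)]
      show (if f ≠ f then "NO" else solLoopA (f :: cs) (f :: fs)) = _
      rw [if_neg (by simp)]
    · by_cases hfc : f ∈ cs
      · rw [solLoopA, dif_pos (by simp [hfc]), solLoopA, dif_pos (by simp [hfc])]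
        show (if e ≠ f then "NO" else _) = (if e ≠ f then "NO" else _)
        rw [if_pos (fun h => hf h.symm), if_pos (fun h => hf h.symm)]
      · have h1 : f ∉ e :: e :: cs := by simp [hf, hfc]
        have h2 : f ∉ e :: cs := by simp [hf, hfc]
        rw [solLoopA, dif_neg h1, solLoopA, dif_neg h2, ih]

-- congruence: two dq's with the same elements and same loop behaviour stay equal under a common front
theorem A_cons_congr (p : Char) (X Y : List Char)
    (hmem : ∀ x, x ∈ X ↔ x ∈ Y)
    (hrec : ∀ edu, solLoopA X edu = solLoopA Y edu) :
    ∀ edu, solLoopA (p :: X) edu = solLoopA (p :: Y) edu := by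
  intro edu
  induction edu with
  | nil => simp [solLoopA]
  | cons e es ih =>
    by_cases he : e ∈ p :: X
    · have he' : e ∈ p :: Y := by
        rcases List.mem_cons.mp he with rfl | h
        · simp
        · exact List.mem_cons_of_mem _ ((hmem e).mp h)
      rw [solLoopA, dif_pos he, solLoopA, dif_pos he']
      show (if p ≠ e then "NO" else solLoopA X (e :: es)) =
           (if p ≠ e then "NO" else solLoopA Y (e :: es))
      by_cases hpe : p = e
      · rw [if_neg (by simp [hpe]), if_neg (by simp [hpe])]; exact hrec (e :: es)
      · rw [if_pos hpe, if_pos hpe]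
    · have he' : e ∉ p :: Y := by
        intro h
        rcases List.mem_cons.mp h with rfl | h
        · exact he (by simp)
        · exact he (List.mem_cons_of_mem _ ((hmem e).mpr h))
      rw [solLoopA, dif_neg he, solLoopA, dif_neg he', ih]

-- A's loop only sees the run-collapsed dq
theorem A_ded : ∀ (dq edu : List Char), solLoopA dq edu = solLoopA (ded dq) edu
  | [], _ => by simp [ded]
  | [c], _ => by simp [ded, dedAux]
  | p :: c :: cs, edu => by
    by_cases h : c = p
    · rw [h]
      have hded : ded (p :: p :: cs) = ded (p :: cs) := by simp [ded, dedAux]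
      rw [pop_dup, A_ded (p :: cs) edu, hded]
    · have hded : ded (p :: c :: cs) = p :: ded (c :: cs) := by
        simp [ded, dedAux, h]
      rw [hded]
      exact A_cons_congr p (c :: cs) (ded (c :: cs))
        (fun x => (mem_ded (c :: cs) x).symm)
        (fun e => A_ded (c :: cs) e) edu
termination_by dq _ => dq.length

-- spec-level first-occurrence index
def fpos : List Char → Char → Option Int
  | [], _ => none
  | e :: es, x => if x = e then some 0 else (fpos es x).map (· + 1)

theorem fpos_cons_self (e : Char) (es : List Char) : fpos (e :: es) e = some 0 := by
  simp [fpos]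

theorem fpos_cons_ne (e x : Char) (es : List Char) (h : x ≠ e) :
    fpos (e :: es) x = (fpos es x).map (· + 1) := by
  simp [fpos, h]

theorem buildFirst_get? (l : List Char) (fp : PySem.Dict Char Int) (i : Int) (x : Char) :
    (buildFirst fp i l).get? x =
      match fp.get? x with
      | some v => some v
      | none => (fpos l x).map (· + i) := by
  induction l generalizing fp i with
  | nil =>
    simp only [buildFirst, fpos]
    cases fp.get? x <;> rfl
  | cons c cs ih =>
    simp only [buildFirst]
    rw [ih]
    by_cases hc : fp.contains c = true
    · rw [if_pos hc]
      cases h : fp.get? x with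
      | some v => rfl
      | none =>
        by_cases hx : x = c
        · subst hx
          rw [PySem.Dict.contains_eq_isSome_get?, h] at hc; simp at hc
        · rw [fpos_cons_ne c x cs hx]
          cases fpos cs x with
          | none => rfl
          | some q => simp; omega
    · rw [if_neg hc]
      by_cases hx : x = c
      · subst hx
        rw [PySem.Dict.get?_insert_self]
        rw [PySem.Dict.contains_eq_isSome_get?] at hc
        cases h : fp.get? x with
        | some v => rw [h] at hc; simp at hc
        | none => rw [fpos_cons_self]; simp
      · rw [PySem.Dict.get?_insert_of_ne _ _ hx]
        cases h : fp.get? x with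
        | some v => rfl
        | none =>
          rw [fpos_cons_ne c x cs hx]
          cases fpos cs x with
          | none => rfl
          | some q => simp; omega

theorem fpos_nonneg (l : List Char) (x : Char) (p : Int) (h : fpos l x = some p) : 0 ≤ p := by
  induction l generalizing p with
  | nil => simp [fpos] at h
  | cons e es ih =>
    by_cases he : x = e
    · subst he; rw [fpos_cons_self] at h; injection h with h; omega
    · rw [fpos_cons_ne e x es he] at h
      cases hq : fpos es x with
      | none => rw [hq] at h; simp at h
      | some q => rw [hq] at h; simp at h; have := ih q hq; omega

-- solLoopB with the table of edu, expressed through fpos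
def wB (edu : List Char) : Int → List Char → String
  | _, [] => "YES"
  | prev, c :: cs =>
    match fpos edu c with
    | none => "NO"
    | some p => if p ≤ prev then "NO" else wB edu p cs

theorem solLoopB_eq_wB (edu xs : List Char) (prev : Int) :
    solLoopB (buildFirst PySem.Dict.empty 0 edu) prev xs = wB edu prev xs := by
  induction xs generalizing prev with
  | nil => rfl
  | cons c cs ih =>
    simp only [solLoopB, wB, buildFirst_get?, PySem.Dict.get?_empty]
    cases fpos edu c with
    | none => rfl
    | some p =>
      simp only [Option.map_some, add_zero]
      split_ifs
      · rfl
      · exact ih p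

-- negative prev's are interchangeable: all table values are ≥ 0
theorem wB_neg (edu xs : List Char) (p q : Int) (hp : p < 0) (hq : q < 0) :
    wB edu p xs = wB edu q xs := by
  cases xs with
  | nil => rfl
  | cons c cs =>
    simp only [wB]
    cases h : fpos edu c with
    | none => rfl
    | some r =>
      have := fpos_nonneg edu c r h
      dsimp only
      rw [if_neg (by omega), if_neg (by omega)]

-- dropping the head of edu shifts every table value by one
theorem wB_shift (e : Char) (es xs : List Char) (prev : Int) (hx : ∀ x ∈ xs, x ≠ e) :
    wB (e :: es) prev xs = wB es (prev - 1) xs := by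
  induction xs generalizing prev with
  | nil => rfl
  | cons c cs ih =>
    have hc : c ≠ e := hx c (by simp)
    simp only [wB, fpos_cons_ne e c es hc]
    cases h : fpos es c with
    | none => rfl
    | some p =>
      simp only [Option.map_some]
      split_ifs with h1 h2 h2
      · rfl
      · omega
      · omega
      · have heq : p + 1 - 1 = p := by omega
        rw [ih (p + 1) (fun x hm => hx x (List.mem_cons_of_mem _ hm)), heq]

-- if some element of xs has table value 0 and prev ≥ 0, the scan fails
theorem wB_no (edu xs : List Char) (e : Char) (prev : Int) (hprev : 0 ≤ prev)
    (he : e ∈ xs) (h0 : fpos edu e = some 0) : wB edu prev xs = "NO" := by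
  induction xs generalizing prev with
  | nil => simp at he
  | cons c cs ih =>
    simp only [wB]
    cases h : fpos edu c with
    | none => rfl
    | some p =>
      dsimp only
      by_cases hpe : p ≤ prev
      · rw [if_pos hpe]
      · rw [if_neg hpe]
        rcases List.mem_cons.mp he with rfl | hmem
        · rw [h] at h0; injection h0 with h0; omega
        · exact ih p (by have := fpos_nonneg edu c p h; omega) hmem

theorem solLoopA_nil (edu : List Char) : solLoopA [] edu = "YES" := by
  induction edu with
  | nil => simp [solLoopA]
  | cons e es ih => simp [solLoopA, ih]

-- main invariant: for dq with no two adjacent equal elements,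
-- A's loop equals the first-occurrence monotone scan
theorem main_inv (edu dq : List Char) (h : List.IsChain (· ≠ ·) dq) :
    solLoopA dq edu = wB edu (-1) dq := by
  induction edu generalizing dq with
  | nil =>
    cases dq with
    | nil => simp [solLoopA, wB]
    | cons c cs => simp [solLoopA, wB, fpos]
  | cons e es ih =>
    cases dq with
    | nil => rw [solLoopA_nil]; rfl
    | cons c cs =>
      have hcs : List.IsChain (· ≠ ·) cs := h.tail
      by_cases hec : e = c
      · subst hec
        have hmem : e ∈ e :: cs := by simp
        rw [solLoopA, dif_pos hmem]
        show (if e ≠ e then "NO" else solLoopA cs (e :: es)) = _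
        rw [if_neg (by simp)]
        by_cases hecs : e ∈ cs
        · -- e occurs again later, non-adjacently: both sides say NO
          cases cs with
          | nil => simp at hecs
          | cons c' cs' =>
            have hcc' : e ≠ c' := (List.isChain_cons_cons.mp h).1
            rw [solLoopA, dif_pos hecs]
            show (if c' ≠ e then "NO" else _) = _
            rw [if_pos (fun hh => hcc' hh.symm)]
            conv_rhs => rw [wB]
            rw [fpos_cons_self]
            simp only []
            rw [if_neg (by omega)]
            exact (wB_no (e :: es) (c' :: cs') e 0 (by omega) hecs
              (fpos_cons_self e es)).symm
        · rw [solLoopA, dif_neg hecs, ih cs hcs]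
          conv_rhs => rw [wB]
          rw [fpos_cons_self]
          simp only []
          rw [if_neg (by omega)]
          rw [wB_shift e es cs 0 (fun x hx hxe => hecs (hxe ▸ hx))]
          norm_num
      · by_cases hecs : e ∈ cs
        · have hmem : e ∈ c :: cs := by simp [hecs]
          rw [solLoopA, dif_pos hmem]
          show (if c ≠ e then "NO" else solLoopA cs (e :: es)) = _
          rw [if_pos (fun hce => hec hce.symm)]
          conv_rhs => rw [wB]
          have h0 : fpos (e :: es) e = some 0 := fpos_cons_self e es
          rw [fpos_cons_ne e c es (fun hce => hec hce.symm)]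
          cases hq : fpos es c with
          | none => rfl
          | some p =>
            have hp0 := fpos_nonneg es c p hq
            simp only [Option.map_some]
            rw [if_neg (by omega)]
            exact (wB_no (e :: es) cs e (p + 1) (by omega) hecs h0).symm
        · have hmem : e ∉ c :: cs := by
            simp only [List.mem_cons, not_or]
            exact ⟨fun hce => hec hce, hecs⟩
          rw [solLoopA, dif_neg hmem, ih _ h]
          rw [wB_shift e es (c :: cs) (-1) (fun x hx hxe => hmem (hxe ▸ hx))]
          exact (wB_neg es (c :: cs) (-1 - 1) (-1) (by omega) (by omega)).symm

-- ===== VERDICT (by name: the statement is the Claim_ definition above) =====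
theorem solution_spec : Claim_equal_solution := by
  intro n m edu _
  unfold Spec_solution solution solution_alt
  rw [solLoopB_eq_wB, buildR_eq_ded, A_ded,
    main_inv edu.toList (ded n.toList) (chain'_ded n.toList)]
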